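-- pv_equiv track=rewrite | github.com/kedarrudrawar/Rosalind-Solutions | LongestManhattanTouristPath.py | findLongestGridPathLength
-- ===== SOURCE A (Python) =====
-- def findLongestGridPathLength(down_matrix, right_matrix):
--     dp_mat = [[0]*(len(right_matrix[0]) + 1) for _ in range(len(down_matrix) + 1)]
--     for i in range(len(right_matrix[0])):
--         dp_mat[0][i+1] = right_matrix[0][i] + dp_mat[0][i]
--     for i in range(len(down_matrix)):
--         dp_mat[i+1][0] = down_matrix[i][0] + dp_mat[i][0]
--
--     for i in range(1, len(dp_mat)):
--         for j in range(1, len(dp_mat[0])):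
--             downVal = down_matrix[i-1][j]
--             rightVal = right_matrix[i][j-1]
--
--             dp_mat[i][j] = max(dp_mat[i-1][j] + downVal, dp_mat[i][j-1] + rightVal)
--
--
--     return dp_mat[-1][-1]
-- ===== SOURCE B (Python) =====
-- def findLongestGridPathLength(down_matrix, right_matrix):
--     # Top-down memoized recursion: f(i, j) = longest path weight reaching cell (i, j),
--     # computed on demand and cached, instead of A's bottom-up filled table.
--     memo = {}
--
--     def f(i, j):
--         if (i, j) in memo:
--             return memo[(i, j)]
--         if i == 0 and j == 0:
--             v = 0
--         elif i == 0:
--             v = f(0, j - 1) + right_matrix[0][j - 1]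
--         elif j == 0:
--             v = f(i - 1, 0) + down_matrix[i - 1][0]
--         else:
--             v = max(f(i - 1, j) + down_matrix[i - 1][j],
--                     f(i, j - 1) + right_matrix[i][j - 1])
--         memo[(i, j)] = v
--         return v
--
--     return f(len(down_matrix), len(right_matrix[0]))
-- ===== Notes on version B (the rewrite author's own statement) =====
-- stated objective: alternative
-- what changed: Replaces A's bottom-up DP table filled in place by three index loops with top-down memoized recursion f(i,j) over a cache dict, computing cell values on demand from the grid recurrence.
import Mathlib
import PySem

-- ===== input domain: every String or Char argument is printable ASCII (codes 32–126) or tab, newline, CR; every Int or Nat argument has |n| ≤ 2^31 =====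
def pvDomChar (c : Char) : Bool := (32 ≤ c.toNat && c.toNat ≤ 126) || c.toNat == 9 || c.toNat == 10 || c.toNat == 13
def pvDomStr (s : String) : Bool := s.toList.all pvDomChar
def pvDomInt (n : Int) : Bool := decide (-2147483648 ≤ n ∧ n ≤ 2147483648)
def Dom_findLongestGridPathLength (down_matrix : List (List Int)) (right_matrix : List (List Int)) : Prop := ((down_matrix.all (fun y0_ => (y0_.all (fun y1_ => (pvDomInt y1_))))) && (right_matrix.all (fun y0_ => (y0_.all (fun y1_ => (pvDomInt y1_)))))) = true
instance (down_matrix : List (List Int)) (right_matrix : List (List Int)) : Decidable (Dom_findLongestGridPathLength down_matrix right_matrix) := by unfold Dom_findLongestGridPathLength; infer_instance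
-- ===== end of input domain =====

-- B replaces A's bottom-up table filled by index loops with top-down memoized recursion
-- f(i,j) over a cache dict (alternative decomposition); return-value equivalence is proved.

-- ===== PORT A =====
-- dp_mat[i][j] read / write helpers (indices are the Nat loop counters, always in range on Pre_)
def aGet2 (dp : List (List Int)) (i j : Nat) : Int := (dp.getD i []).getD j 0
def aSet2 (dp : List (List Int)) (i j : Nat) (v : Int) : List (List Int) :=
  dp.set i ((dp.getD i []).set j v)

def findLongestGridPathLength (down_matrix : List (List Int)) (right_matrix : List (List Int)) : Int :=
  let r0 := PySem.List.pyGetD right_matrix 0 []   -- right_matrix[0] (IndexError on [] is outside Pre_)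
  let m := r0.length
  let n := down_matrix.length
  let dp0 : List (List Int) := List.replicate (n+1) (List.replicate (m+1) (0:Int))
  let dp1 := (List.range m).foldl (fun dp i => aSet2 dp 0 (i+1) (r0.getD i 0 + aGet2 dp 0 i)) dp0
  let dp2 := (List.range n).foldl
      (fun dp i => aSet2 dp (i+1) 0 ((down_matrix.getD i []).getD 0 0 + aGet2 dp i 0)) dp1
  -- range(1, len(dp_mat)) and range(1, len(dp_mat[0])): len(dp_mat) = n+1, len(dp_mat[0]) = m+1 by construction
  let dp3 := (List.range' 1 n).foldl (fun dp i =>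
      (List.range' 1 m).foldl (fun dp j =>
        let downVal := (down_matrix.getD (i-1) []).getD j 0
        let rightVal := (right_matrix.getD i []).getD (j-1) 0
        aSet2 dp i j (max (aGet2 dp (i-1) j + downVal) (aGet2 dp i (j-1) + rightVal))) dp) dp2
  PySem.List.pyGetD (PySem.List.pyGetD dp3 (-1) []) (-1) 0   -- dp_mat[-1][-1]

-- ===== PORT B =====
-- the inner recursive 'f(i, j)' of Source B, threading the memo dict through the calls;
-- on Pre_ all indices are in range, so list reads use getD as in port A
def fB (down_matrix right_matrix : List (List Int)) (i j : Nat)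
    (memo : PySem.Dict (Nat × Nat) Int) : Int × PySem.Dict (Nat × Nat) Int :=
  match memo.get? (i, j) with
  | some v => (v, memo)
  | none =>
    let p : Int × PySem.Dict (Nat × Nat) Int :=
      if _h0 : i = 0 ∧ j = 0 then ((0 : Int), memo)
      else if _hi : i = 0 then
        let q := fB down_matrix right_matrix 0 (j - 1) memo
        (q.1 + (right_matrix.getD 0 []).getD (j - 1) 0, q.2)
      else if _hj : j = 0 then
        let q := fB down_matrix right_matrix (i - 1) 0 memo
        (q.1 + (down_matrix.getD (i - 1) []).getD 0 0, q.2)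
      else
        let q := fB down_matrix right_matrix (i - 1) j memo
        let r := fB down_matrix right_matrix i (j - 1) q.2
        (max (q.1 + (down_matrix.getD (i - 1) []).getD j 0)
             (r.1 + (right_matrix.getD i []).getD (j - 1) 0), r.2)
    (p.1, p.2.insert (i, j) p.1)
termination_by i + j
decreasing_by all_goals omega

def findLongestGridPathLength_alt (down_matrix : List (List Int)) (right_matrix : List (List Int)) : Int :=
  (fB down_matrix right_matrix down_matrix.length
     (PySem.List.pyGetD right_matrix 0 []).length PySem.Dict.empty).1

-- ===== PRECONDITION & SPEC =====
-- Pre_ is exactly the set of inputs on which the Python A returns (no IndexError): right_matrix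
-- is nonempty, every down row has at least m+1 entries, and (unless m = 0 or there are no down
-- rows) right_matrix has more rows than down_matrix, each of the first n+1 having at least m entries.
def Pre_findLongestGridPathLength (down_matrix : List (List Int)) (right_matrix : List (List Int)) : Prop :=
  right_matrix ≠ [] ∧
  (∀ row ∈ down_matrix, (right_matrix.getD 0 []).length + 1 ≤ row.length) ∧
  ((right_matrix.getD 0 []).length = 0 ∨ down_matrix = [] ∨
    (down_matrix.length < right_matrix.length ∧
     ∀ i ≤ down_matrix.length, (right_matrix.getD 0 []).length ≤ (right_matrix.getD i []).length))
instance (down_matrix : List (List Int)) (right_matrix : List (List Int)) : Decidable (Pre_findLongestGridPathLength down_matrix right_matrix) := by unfold Pre_findLongestGridPathLength; infer_instance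

def pvWitness_findLongestGridPathLength : List (List Int) × List (List Int) :=
  ([[1, 0, 2], [4, 5, 3]], [[3, 2], [2, 4], [0, 7]])

def Spec_findLongestGridPathLength (down_matrix : List (List Int)) (right_matrix : List (List Int)) (out : Int) : Prop := out = findLongestGridPathLength_alt down_matrix right_matrix
instance (down_matrix : List (List Int)) (right_matrix : List (List Int)) (out : Int) : Decidable (Spec_findLongestGridPathLength down_matrix right_matrix out) := by unfold Spec_findLongestGridPathLength; infer_instance

-- ===== CLAIM (what is proved, stated in full; the proofs are below) =====
def Claim_equal_findLongestGridPathLength : Prop := ∀ (down_matrix : List (List Int)) (right_matrix : List (List Int)), Dom_findLongestGridPathLength down_matrix right_matrix → Pre_findLongestGridPathLength down_matrix right_matrix → Spec_findLongestGridPathLength down_matrix right_matrix (findLongestGridPathLength down_matrix right_matrix)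

-- ===== LEMMAS AND PROOFS =====

-- the pure value f(i, j) computes: the textbook grid recurrence
def Fpure (dm rm : List (List Int)) : Nat → Nat → Int
  | 0, 0 => 0
  | 0, j+1 => Fpure dm rm 0 j + (rm.getD 0 []).getD j 0
  | i+1, 0 => Fpure dm rm i 0 + (dm.getD i []).getD 0 0
  | i+1, j+1 => max (Fpure dm rm i (j+1) + (dm.getD i []).getD (j+1) 0)
                    (Fpure dm rm (i+1) j + (rm.getD (i+1) []).getD j 0)
termination_by i j => (i, j)

-- memo invariant: every cached value is the pure value
def GoodMemo (dm rm : List (List Int)) (memo : PySem.Dict (Nat × Nat) Int) : Prop :=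
  ∀ i j v, memo.get? (i, j) = some v → v = Fpure dm rm i j

theorem goodMemo_insert (dm rm : List (List Int)) (memo : PySem.Dict (Nat × Nat) Int)
    (i j : Nat) (h : GoodMemo dm rm memo) :
    GoodMemo dm rm (memo.insert (i, j) (Fpure dm rm i j)) := by
  intro i' j' v hv
  rw [PySem.Dict.get?_insert] at hv
  split at hv
  · next heq => cases hv; cases Prod.mk.injEq .. ▸ heq with
      | intro h1 h2 => rw [h1, h2]
  · exact h i' j' v hv

-- the memoized recursion is correct and preserves the invariant
theorem fB_correct (dm rm : List (List Int)) :
    ∀ i j memo, GoodMemo dm rm memo →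
      (fB dm rm i j memo).1 = Fpure dm rm i j ∧ GoodMemo dm rm (fB dm rm i j memo).2 := by
  intro i j
  induction i, j using Fpure.induct with
  | case1 =>
    intro memo hm
    rw [fB]
    cases hg : memo.get? (0, 0) with
    | some v => exact ⟨hm 0 0 v hg, hm⟩
    | none =>
      simp only [and_self, dite_true]
      refine ⟨by rw [Fpure], ?_⟩
      have := goodMemo_insert dm rm memo 0 0 hm
      simpa [Fpure] using this
  | case2 j ih =>
    intro memo hm
    rw [fB]
    cases hg : memo.get? (0, j+1) with
    | some v => exact ⟨hm 0 (j+1) v hg, hm⟩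
    | none =>
      simp only [Nat.succ_ne_zero, and_false, dite_false, dite_true, Nat.succ_sub_one,
        Nat.add_sub_cancel]
      obtain ⟨h1, h2⟩ := ih memo hm
      refine ⟨by rw [h1, Fpure], ?_⟩
      have := goodMemo_insert dm rm (fB dm rm 0 j memo).2 0 (j+1) h2
      rw [h1]
      simpa [Fpure] using this
  | case3 i ih =>
    intro memo hm
    rw [fB]
    cases hg : memo.get? (i+1, 0) with
    | some v => exact ⟨hm (i+1) 0 v hg, hm⟩
    | none =>
      simp only [Nat.succ_ne_zero, false_and, and_false, dite_false, dite_true,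
        Nat.succ_sub_one, Nat.add_sub_cancel]
      obtain ⟨h1, h2⟩ := ih memo hm
      refine ⟨by rw [h1, Fpure], ?_⟩
      have := goodMemo_insert dm rm (fB dm rm i 0 memo).2 (i+1) 0 h2
      rw [h1]
      simpa [Fpure] using this
  | case4 i j ih1 ih2 =>
    intro memo hm
    rw [fB]
    cases hg : memo.get? (i+1, j+1) with
    | some v => exact ⟨hm (i+1) (j+1) v hg, hm⟩
    | none =>
      simp only [Nat.succ_ne_zero, false_and, and_false, dite_false,
        Nat.succ_sub_one, Nat.add_sub_cancel]
      obtain ⟨h1, h2⟩ := ih1 memo hm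
      obtain ⟨h3, h4⟩ := ih2 (fB dm rm i (j+1) memo).2 h2
      refine ⟨by rw [h1, h3, Fpure], ?_⟩
      have := goodMemo_insert dm rm (fB dm rm (i+1) j (fB dm rm i (j+1) memo).2).2 (i+1) (j+1) h4
      rw [h1, h3]
      simpa [Fpure] using this

-- ---- characterisation of A's table: the sequence of dp rows ----
-- B's former building blocks reused as proof-side descriptions of A's rows
def pBody (row : List Int) (v : Int) : List Int := row ++ [PySem.List.pyGetD row (-1) 0 + v]

def prefP (r0 : List Int) (k : Nat) : List Int := (r0.take k).foldl pBody [(0:Int)]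

def bBody (row drow rrow : List Int) (nw : List Int) (j : Nat) : List Int :=
  nw ++ [max (row.getD j 0 + drow.getD j 0)
         (PySem.List.pyGetD nw (-1) 0 + rrow.getD (j-1) 0)]

def bsp (row drow rrow : List Int) (k : Nat) : List Int :=
  (List.range' 1 k).foldl (bBody row drow rrow) [row.getD 0 0 + drow.getD 0 0]

def rowsB (dm rm : List (List Int)) : Nat → List Int
  | 0 => prefP (rm.getD 0 []) (rm.getD 0 []).length
  | i+1 => bsp (rowsB dm rm i) (dm.getD i []) (rm.getD (i+1) []) (rm.getD 0 []).length

-- the first column of A's dp table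
def colSeq (dm : List (List Int)) : Nat → Int
  | 0 => 0
  | i+1 => (dm.getD i []).getD 0 0 + colSeq dm i

-- generic: setting the element right after a prefix
theorem set_append_len {α : Type} (xs : List α) (y v : α) (ys : List α) :
    (xs ++ y :: ys).set xs.length v = xs ++ v :: ys := by
  induction xs with
  | nil => rfl
  | cons a t ih => simp [ih]

theorem getD_append_len {α : Type} (xs : List α) (y : α) (ys : List α) (d : α) :
    (xs ++ y :: ys).getD xs.length d = y := by
  induction xs with
  | nil => rfl
  | cons a t ih => simpa using ih

-- last element of a nonempty list as getD at length-1
theorem getD_last_eq_pyGetD (xs : List Int) (h : xs ≠ []) :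
    xs.getD (xs.length - 1) 0 = PySem.List.pyGetD xs (-1) 0 := by
  rw [PySem.List.pyGetD_neg_one xs 0 h, List.getLast_eq_getElem,
    List.getD_eq_getElem _ _ (by cases xs with | nil => simp at h | cons a t => simp)]

-- ---- prefP facts ----
theorem prefP_succ (r0 : List Int) (k : Nat) (h : k < r0.length) :
    prefP r0 (k+1) = prefP r0 k ++ [PySem.List.pyGetD (prefP r0 k) (-1) 0 + r0[k]] := by
  unfold prefP
  rw [List.take_add_one, List.getElem?_eq_getElem h, Option.toList_some, List.foldl_append]
  rfl

theorem prefP_length (r0 : List Int) : ∀ k, k ≤ r0.length → (prefP r0 k).length = k + 1 := by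
  intro k
  induction k with
  | zero => intro _; rfl
  | succ k ih =>
    intro h
    rw [prefP_succ r0 k (by omega)]
    simp [ih (by omega)]

theorem prefP_getD0 (r0 : List Int) : ∀ k, k ≤ r0.length → (prefP r0 k).getD 0 0 = 0 := by
  intro k
  induction k with
  | zero => intro _; rfl
  | succ k ih =>
    intro h
    rw [prefP_succ r0 k (by omega)]
    rw [List.getD_append _ _ _ 0 (by rw [prefP_length r0 k (by omega)]; omega)]
    exact ih (by omega)

-- ---- bsp facts ----
theorem bsp_succ (row drow rrow : List Int) (k : Nat) :
    bsp row drow rrow (k+1) = bsp row drow rrow k ++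
      [max (row.getD (1+k) 0 + drow.getD (1+k) 0)
        (PySem.List.pyGetD (bsp row drow rrow k) (-1) 0 + rrow.getD (1+k-1) 0)] := by
  unfold bsp
  rw [List.range'_concat, List.foldl_append]
  simp only [Nat.one_mul, List.foldl_cons, List.foldl_nil]
  rfl

theorem bsp_length (row drow rrow : List Int) : ∀ k, (bsp row drow rrow k).length = k + 1 := by
  intro k
  induction k with
  | zero => rfl
  | succ k ih => rw [bsp_succ]; simp [ih]

theorem bsp_getD0 (row drow rrow : List Int) :
    ∀ k, (bsp row drow rrow k).getD 0 0 = row.getD 0 0 + drow.getD 0 0 := by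
  intro k
  induction k with
  | zero => rfl
  | succ k ih =>
    rw [bsp_succ]
    rw [List.getD_append _ _ _ 0 (by rw [bsp_length]; omega)]
    exact ih

-- ---- rowsB facts ----
theorem rowsB_getD0 (dm rm : List (List Int)) :
    ∀ i, (rowsB dm rm i).getD 0 0 = colSeq dm i := by
  intro i
  induction i with
  | zero => exact prefP_getD0 _ _ le_rfl
  | succ i ih =>
    show (bsp _ _ _ _).getD 0 0 = _
    rw [bsp_getD0, ih,
      show colSeq dm (i+1) = (dm.getD i []).getD 0 0 + colSeq dm i from rfl]
    ring

-- ---- loop 1: only row 0 is touched ----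
theorem loop1_spec (r0 : List Int) (L : List Nat) :
    ∀ dp : List (List Int), 0 < dp.length →
      L.foldl (fun dp i => aSet2 dp 0 (i+1) (r0.getD i 0 + aGet2 dp 0 i)) dp
        = dp.set 0 (L.foldl (fun c i => c.set (i+1) (r0.getD i 0 + c.getD i 0)) (dp.getD 0 [])) := by
  induction L with
  | nil =>
    intro dp hdp
    rw [List.foldl_nil, List.foldl_nil, List.getD_eq_getElem _ _ hdp, List.set_getElem_self hdp]
  | cons a L ih =>
    intro dp hdp
    simp only [List.foldl_cons]
    rw [ih _ (by simpa [aSet2] using hdp)]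
    have hx : ∀ x : List Int, (dp.set 0 x).getD 0 [] = x := fun x => by
      simp [List.getD, List.getElem?_set_self hdp]
    unfold aSet2
    rw [List.set_set, hx]
    rfl

-- ---- loop 1 row-level: the set-loop builds the prefix sums ----
theorem rowFold1_pref (r0 : List Int) :
    ∀ k, k ≤ r0.length →
      (List.range k).foldl (fun c i => c.set (i+1) (r0.getD i 0 + c.getD i 0))
          (List.replicate (r0.length+1) (0:Int))
        = prefP r0 k ++ List.replicate (r0.length - k) 0 := by
  intro k
  induction k with
  | zero => intro _; rfl
  | succ k ih =>
    intro h
    rw [List.range_succ, List.foldl_append, ih (by omega)]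
    simp only [List.foldl_cons, List.foldl_nil]
    have hlen : (prefP r0 k).length = k + 1 := prefP_length r0 k (by omega)
    have hget : (prefP r0 k ++ List.replicate (r0.length - k) (0:Int)).getD k 0
        = PySem.List.pyGetD (prefP r0 k) (-1) 0 := by
      rw [List.getD_append _ _ _ k (by omega)]
      have := getD_last_eq_pyGetD (prefP r0 k) (by intro hc; rw [hc] at hlen; simp at hlen)
      rw [hlen] at this; simpa using this
    rw [hget]
    have hrep : List.replicate (r0.length - k) (0:Int) = 0 :: List.replicate (r0.length - (k+1)) 0 := by
      rw [show r0.length - k = (r0.length - (k+1)) + 1 by omega, List.replicate_succ]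
    rw [hrep]
    have hset := set_append_len (prefP r0 k) (0:Int)
      (r0.getD k 0 + PySem.List.pyGetD (prefP r0 k) (-1) 0) (List.replicate (r0.length - (k+1)) 0)
    rw [hlen] at hset
    rw [hset, prefP_succ r0 k (by omega), List.append_assoc]
    rw [List.getD_eq_getElem r0 0 (by omega : k < r0.length), Int.add_comm]
    rfl

-- ---- loop 2: the first column ----
theorem loop2_spec (dm rm : List (List Int)) :
    ∀ k, k ≤ dm.length →
      (List.range k).foldl
          (fun dp i => aSet2 dp (i+1) 0 ((dm.getD i []).getD 0 0 + aGet2 dp i 0))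
          (rowsB dm rm 0 :: List.replicate dm.length (List.replicate ((rm.getD 0 []).length + 1) 0))
        = rowsB dm rm 0 ::
            ((List.range k).map (fun i => colSeq dm (i+1) :: List.replicate (rm.getD 0 []).length 0)
              ++ List.replicate (dm.length - k) (List.replicate ((rm.getD 0 []).length + 1) 0)) := by
  intro k
  induction k with
  | zero => intro _; simp
  | succ k ih =>
    intro h
    rw [List.range_succ, List.foldl_append, ih (by omega)]
    simp only [List.foldl_cons, List.foldl_nil]
    have hclen : (List.map (fun i => colSeq dm (i+1) :: List.replicate (rm.getD 0 []).length (0:Int)) (List.range k)).length = k := by simp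
    have hrep : List.replicate (dm.length - k) (List.replicate ((rm.getD 0 []).length + 1) (0:Int))
        = List.replicate ((rm.getD 0 []).length + 1) (0:Int) :: List.replicate (dm.length - (k+1)) (List.replicate ((rm.getD 0 []).length + 1) 0) := by
      rw [show dm.length - k = (dm.length - (k+1)) + 1 by omega, List.replicate_succ]
    have hread : aGet2 (rowsB dm rm 0 ::
          (List.map (fun i => colSeq dm (i+1) :: List.replicate (rm.getD 0 []).length (0:Int)) (List.range k)
            ++ List.replicate (dm.length - k) (List.replicate ((rm.getD 0 []).length + 1) 0))) k 0
        = colSeq dm k := by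
      cases k with
      | zero => exact rowsB_getD0 dm rm 0
      | succ k' =>
        unfold aGet2
        rw [List.getD_cons_succ]
        rw [List.getD_append _ _ _ k' (by simpa using by omega)]
        simp [List.getD, List.getElem?_map, List.getElem?_range (show k' < k'+1 by omega)]
    rw [hread]
    unfold aSet2
    rw [hrep]
    have hget : ((rowsB dm rm 0 ::
          (List.map (fun i => colSeq dm (i+1) :: List.replicate (rm.getD 0 []).length (0:Int)) (List.range k)
            ++ List.replicate ((rm.getD 0 []).length + 1) (0:Int)
              :: List.replicate (dm.length - (k+1)) (List.replicate ((rm.getD 0 []).length + 1) 0)))).getD (k+1) []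
        = List.replicate ((rm.getD 0 []).length + 1) (0:Int) := by
      rw [List.getD_cons_succ]
      have h2 := getD_append_len (List.map (fun i => colSeq dm (i+1) :: List.replicate (rm.getD 0 []).length (0:Int)) (List.range k))
        (List.replicate ((rm.getD 0 []).length + 1) (0:Int))
        (List.replicate (dm.length - (k+1)) (List.replicate ((rm.getD 0 []).length + 1) 0)) []
      rw [hclen] at h2; exact h2
    rw [hget]
    have hsetrow : (List.replicate ((rm.getD 0 []).length + 1) (0:Int)).set 0 ((dm.getD k []).getD 0 0 + colSeq dm k)
        = ((dm.getD k []).getD 0 0 + colSeq dm k) :: List.replicate (rm.getD 0 []).length 0 := by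
      rw [List.replicate_succ]; rfl
    rw [hsetrow, List.set_cons_succ]
    have hset := set_append_len (List.map (fun i => colSeq dm (i+1) :: List.replicate (rm.getD 0 []).length (0:Int)) (List.range k))
      (List.replicate ((rm.getD 0 []).length + 1) (0:Int))
      (((dm.getD k []).getD 0 0 + colSeq dm k) :: List.replicate (rm.getD 0 []).length 0)
      (List.replicate (dm.length - (k+1)) (List.replicate ((rm.getD 0 []).length + 1) 0))
    rw [hclen] at hset
    rw [hset]
    simp only [List.range_succ, List.map_append, List.map_cons, List.map_nil, List.append_assoc,
      List.singleton_append, List.cons_append, List.nil_append]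
    rfl

-- ---- loop 3 inner: only row i is touched; reduce to a row-level fold ----
theorem innerA_spec (dm rm : List (List Int)) (i : Nat) (hi : 1 ≤ i) (L : List Nat) :
    ∀ dp : List (List Int), i < dp.length →
      L.foldl (fun dp j =>
          let downVal := (dm.getD (i-1) []).getD j 0
          let rightVal := (rm.getD i []).getD (j-1) 0
          aSet2 dp i j (max (aGet2 dp (i-1) j + downVal) (aGet2 dp i (j-1) + rightVal))) dp
        = dp.set i (L.foldl (fun c j =>
            c.set j (max ((dp.getD (i-1) []).getD j 0 + (dm.getD (i-1) []).getD j 0)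
              (c.getD (j-1) 0 + (rm.getD i []).getD (j-1) 0))) (dp.getD i [])) := by
  induction L with
  | nil =>
    intro dp hdp
    rw [List.foldl_nil, List.foldl_nil, List.getD_eq_getElem _ _ hdp, List.set_getElem_self hdp]
  | cons a L ih =>
    intro dp hdp
    simp only [List.foldl_cons]
    rw [ih _ (by simpa [aSet2] using hdp)]
    have hx : ∀ x : List Int, (dp.set i x).getD i [] = x := fun x => by
      simp [List.getD, List.getElem?_set_self hdp]
    have hprev : ∀ x : List Int, (dp.set i x).getD (i-1) [] = dp.getD (i-1) [] := fun x => by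
      simp [List.getD, List.getElem?_set_ne (show i ≠ i - 1 by omega)]
    unfold aSet2
    rw [List.set_set, hx, hprev]
    rfl

-- ---- loop 3 row-level: the set-loop equals the append-loop description ----
theorem rowFoldA_bsp (row drow rrow : List Int) (m : Nat) :
    ∀ k, k ≤ m →
      (List.range' 1 k).foldl (fun c j =>
          c.set j (max (row.getD j 0 + drow.getD j 0) (c.getD (j-1) 0 + rrow.getD (j-1) 0)))
          ((row.getD 0 0 + drow.getD 0 0) :: List.replicate m 0)
        = bsp row drow rrow k ++ List.replicate (m - k) 0 := by
  intro k
  induction k with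
  | zero => intro _; rfl
  | succ k ih =>
    intro h
    rw [List.range'_concat, List.foldl_append, ih (by omega)]
    simp only [List.foldl_cons, List.foldl_nil, Nat.one_mul]
    have hlen := bsp_length row drow rrow k
    have hget : (bsp row drow rrow k ++ List.replicate (m - k) (0:Int)).getD (1 + k - 1) 0
        = PySem.List.pyGetD (bsp row drow rrow k) (-1) 0 := by
      rw [show 1 + k - 1 = k by omega, List.getD_append _ _ _ k (by omega)]
      have := getD_last_eq_pyGetD (bsp row drow rrow k) (by intro hc; rw [hc] at hlen; simp at hlen)
      rw [hlen] at this; simpa using this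
    rw [hget]
    have hrep : List.replicate (m - k) (0:Int) = 0 :: List.replicate (m - (k+1)) 0 := by
      rw [show m - k = (m - (k+1)) + 1 by omega, List.replicate_succ]
    rw [hrep]
    have hset := set_append_len (bsp row drow rrow k) (0:Int)
      (max (row.getD (1+k) 0 + drow.getD (1+k) 0)
        (PySem.List.pyGetD (bsp row drow rrow k) (-1) 0 + rrow.getD (1+k-1) 0))
      (List.replicate (m - (k+1)) 0)
    rw [hlen] at hset
    rw [show (1:Nat) + k = k + 1 from Nat.add_comm 1 k] at hset ⊢
    rw [hset, bsp_succ]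
    rw [show (1:Nat) + k = k + 1 from Nat.add_comm 1 k]
    simp

-- ---- loop 3: rows become the row sequence one after the other ----
theorem loop3_spec (dm rm : List (List Int)) :
    ∀ k, k ≤ dm.length →
      (List.range' 1 k).foldl
          (fun dp i => (List.range' 1 (rm.getD 0 []).length).foldl
            (fun dp j =>
              let downVal := (dm.getD (i-1) []).getD j 0
              let rightVal := (rm.getD i []).getD (j-1) 0
              aSet2 dp i j (max (aGet2 dp (i-1) j + downVal) (aGet2 dp i (j-1) + rightVal))) dp)
          (rowsB dm rm 0 ::
            (List.range dm.length).map (fun i => colSeq dm (i+1) :: List.replicate (rm.getD 0 []).length 0))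
        = (List.range (k+1)).map (rowsB dm rm)
            ++ (List.range' (k+1) (dm.length - k)).map
                (fun i => colSeq dm i :: List.replicate (rm.getD 0 []).length 0) := by
  intro k
  induction k with
  | zero =>
    intro _
    simp only [List.range'_zero, List.foldl_nil, Nat.zero_add, Nat.sub_zero]
    have hmap : (List.range' 1 dm.length).map (fun i => colSeq dm i :: List.replicate (rm.getD 0 []).length (0:Int))
        = (List.range dm.length).map (fun i => colSeq dm (i+1) :: List.replicate (rm.getD 0 []).length 0) := by
      rw [List.range'_eq_map_range, List.map_map]
      apply List.map_congr_left
      intro i _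
      simp [Nat.add_comm 1 i]
    rw [hmap, List.range_one, List.map_cons, List.map_nil, List.singleton_append]
  | succ k ih =>
    intro h
    rw [List.range'_concat, List.foldl_append, ih (by omega)]
    simp only [List.foldl_cons, List.foldl_nil, Nat.one_mul,
      show (1:Nat) + k = k + 1 from Nat.add_comm 1 k, Nat.add_sub_cancel]
    have hrep : List.range' (k+1) (dm.length - k)
        = (k+1) :: List.range' (k+2) (dm.length - (k+1)) := by
      rw [show dm.length - k = (dm.length - (k+1)) + 1 by omega, List.range'_succ]
    rw [hrep, List.map_cons]
    have hflen : ((List.range (k+1)).map (rowsB dm rm)).length = k + 1 := by simp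
    have hinner := innerA_spec dm rm (k+1) (by omega) (List.range' 1 (rm.getD 0 []).length)
      ((List.range (k+1)).map (rowsB dm rm) ++ (colSeq dm (k+1) :: List.replicate (rm.getD 0 []).length 0)
        :: (List.range' (k+2) (dm.length - (k+1))).map
            (fun i => colSeq dm i :: List.replicate (rm.getD 0 []).length 0))
      (by simp)
    simp only [Nat.add_sub_cancel] at hinner
    rw [hinner]
    have hprev : ((List.range (k+1)).map (rowsB dm rm) ++ (colSeq dm (k+1) :: List.replicate (rm.getD 0 []).length 0)
          :: (List.range' (k+2) (dm.length - (k+1))).map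
              (fun i => colSeq dm i :: List.replicate (rm.getD 0 []).length 0)).getD k []
        = rowsB dm rm k := by
      rw [List.getD_append _ _ _ k (by omega)]
      simp [List.getD, List.getElem?_range (show k < k+1 by omega)]
    have hcur : ((List.range (k+1)).map (rowsB dm rm) ++ (colSeq dm (k+1) :: List.replicate (rm.getD 0 []).length 0)
          :: (List.range' (k+2) (dm.length - (k+1))).map
              (fun i => colSeq dm i :: List.replicate (rm.getD 0 []).length 0)).getD (k+1) []
        = colSeq dm (k+1) :: List.replicate (rm.getD 0 []).length 0 := by
      have h2 := getD_append_len ((List.range (k+1)).map (rowsB dm rm))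
        (colSeq dm (k+1) :: List.replicate (rm.getD 0 []).length 0)
        ((List.range' (k+2) (dm.length - (k+1))).map
          (fun i => colSeq dm i :: List.replicate (rm.getD 0 []).length 0)) ([] : List Int)
      rw [hflen] at h2; exact h2
    rw [hprev, hcur]
    have hcol : colSeq dm (k+1) = (rowsB dm rm k).getD 0 0 + (dm.getD k []).getD 0 0 := by
      rw [rowsB_getD0, show colSeq dm (k+1) = (dm.getD k []).getD 0 0 + colSeq dm k from rfl]
      ring
    rw [hcol, rowFoldA_bsp (rowsB dm rm k) (dm.getD k []) (rm.getD (k+1) []) _ _ le_rfl,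
      Nat.sub_self, List.replicate_zero, List.append_nil]
    have hstep : bsp (rowsB dm rm k) (dm.getD k []) (rm.getD (k+1) []) (rm.getD 0 []).length
        = rowsB dm rm (k+1) := rfl
    rw [hstep]
    have hset := set_append_len ((List.range (k+1)).map (rowsB dm rm))
      (((rowsB dm rm k).getD 0 0 + (dm.getD k []).getD 0 0) :: List.replicate (rm.getD 0 []).length 0)
      (rowsB dm rm (k+1))
      ((List.range' (k+2) (dm.length - (k+1))).map
        (fun i => colSeq dm i :: List.replicate (rm.getD 0 []).length 0))
    rw [hflen] at hset
    rw [hset]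
    simp only [List.range_succ, List.map_append, List.map_cons, List.map_nil, List.append_assoc,
      List.singleton_append, List.cons_append, List.nil_append]

-- ---- the row sequence carries the pure recurrence values ----
theorem prefP_getD_F (dm rm : List (List Int)) :
    ∀ k, k ≤ (rm.getD 0 []).length → ∀ j, j ≤ k →
      (prefP (rm.getD 0 []) k).getD j 0 = Fpure dm rm 0 j := by
  intro k
  induction k with
  | zero => intro _ j hj; interval_cases j; simp [prefP, Fpure]
  | succ k ih =>
    intro hk j hj
    rw [prefP_succ _ k (by omega)]
    rcases Nat.lt_or_ge j (k+1) with hlt | hge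
    · rw [List.getD_append _ _ _ j (by rw [prefP_length _ k (by omega)]; omega)]
      exact ih (by omega) j (by omega)
    · have hj1 : j = k + 1 := by omega
      subst hj1
      have hlen : (prefP (rm.getD 0 []) k).length = k + 1 := prefP_length _ k (by omega)
      have hget := getD_append_len (prefP (rm.getD 0 []) k)
        (PySem.List.pyGetD (prefP (rm.getD 0 []) k) (-1) 0 + (rm.getD 0 [])[k]) ([] : List Int) 0
      rw [hlen] at hget
      rw [show prefP (rm.getD 0 []) k ++ [PySem.List.pyGetD (prefP (rm.getD 0 []) k) (-1) 0 + (rm.getD 0 [])[k]]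
          = prefP (rm.getD 0 []) k ++ (PySem.List.pyGetD (prefP (rm.getD 0 []) k) (-1) 0 + (rm.getD 0 [])[k]) :: [] from rfl,
        hget]
      have hlast : PySem.List.pyGetD (prefP (rm.getD 0 []) k) (-1) 0 = Fpure dm rm 0 k := by
        rw [← getD_last_eq_pyGetD _ (by intro hc; rw [hc] at hlen; simp at hlen), hlen]
        simpa using ih (by omega) k le_rfl
      rw [hlast, Fpure, List.getD_eq_getElem _ 0 (by omega : k < (rm.getD 0 []).length)]
      rfl

theorem bsp_getD_F (dm rm : List (List Int)) (i : Nat)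
    (hrow : ∀ j, j ≤ (rm.getD 0 []).length → (rowsB dm rm i).getD j 0 = Fpure dm rm i j) :
    ∀ k, k ≤ (rm.getD 0 []).length → ∀ j, j ≤ k →
      (bsp (rowsB dm rm i) (dm.getD i []) (rm.getD (i+1) []) k).getD j 0 = Fpure dm rm (i+1) j := by
  intro k
  induction k with
  | zero =>
    intro _ j hj
    interval_cases j
    rw [show bsp (rowsB dm rm i) (dm.getD i []) (rm.getD (i+1) []) 0
        = [(rowsB dm rm i).getD 0 0 + (dm.getD i []).getD 0 0] from rfl]
    rw [List.getD_cons_zero, hrow 0 (by omega), Fpure]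
  | succ k ih =>
    intro hk j hj
    rw [bsp_succ]
    rcases Nat.lt_or_ge j (k+1) with hlt | hge
    · rw [List.getD_append _ _ _ j (by rw [bsp_length]; omega)]
      exact ih (by omega) j (by omega)
    · have hj1 : j = k + 1 := by omega
      subst hj1
      have hlen := bsp_length (rowsB dm rm i) (dm.getD i []) (rm.getD (i+1) []) k
      have hget := getD_append_len (bsp (rowsB dm rm i) (dm.getD i []) (rm.getD (i+1) []) k)
        (max ((rowsB dm rm i).getD (1+k) 0 + (dm.getD i []).getD (1+k) 0)
          (PySem.List.pyGetD (bsp (rowsB dm rm i) (dm.getD i []) (rm.getD (i+1) []) k) (-1) 0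
            + (rm.getD (i+1) []).getD (1+k-1) 0)) ([] : List Int) 0
      rw [hlen] at hget
      rw [show ∀ x : Int, (bsp (rowsB dm rm i) (dm.getD i []) (rm.getD (i+1) []) k) ++ [x]
          = (bsp (rowsB dm rm i) (dm.getD i []) (rm.getD (i+1) []) k) ++ x :: [] from fun _ => rfl,
        hget]
      have hlast : PySem.List.pyGetD (bsp (rowsB dm rm i) (dm.getD i []) (rm.getD (i+1) []) k) (-1) 0
          = Fpure dm rm (i+1) k := by
        rw [← getD_last_eq_pyGetD _ (by intro hc; rw [hc] at hlen; simp at hlen), hlen]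
        simpa using ih (by omega) k le_rfl
      rw [hlast, show (1:Nat)+k = k+1 from Nat.add_comm 1 k, Fpure, hrow (k+1) (by omega)]
      simp

theorem rowsB_getD_F (dm rm : List (List Int)) :
    ∀ i j, j ≤ (rm.getD 0 []).length → (rowsB dm rm i).getD j 0 = Fpure dm rm i j := by
  intro i
  induction i with
  | zero => exact fun j hj => prefP_getD_F dm rm _ le_rfl j hj
  | succ i ih =>
    intro j hj
    exact bsp_getD_F dm rm i ih _ le_rfl j hj

-- ---- assembling the three loop stages of A ----
theorem stageA1 (dm rm : List (List Int)) :
    (List.range (rm.getD 0 []).length).foldl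
        (fun dp i => aSet2 dp 0 (i+1) ((rm.getD 0 []).getD i 0 + aGet2 dp 0 i))
        (List.replicate (dm.length+1) (List.replicate ((rm.getD 0 []).length+1) 0))
      = rowsB dm rm 0 :: List.replicate dm.length (List.replicate ((rm.getD 0 []).length+1) 0) := by
  rw [loop1_spec _ _ _ (by simp)]
  rw [show List.replicate (dm.length+1) (List.replicate ((rm.getD 0 []).length+1) (0:Int))
      = List.replicate ((rm.getD 0 []).length+1) (0:Int)
        :: List.replicate dm.length (List.replicate ((rm.getD 0 []).length+1) 0) from
    List.replicate_succ ..]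
  rw [List.getD_cons_zero, List.set_cons_zero]
  rw [rowFold1_pref _ _ le_rfl, Nat.sub_self, List.replicate_zero, List.append_nil]
  rfl

theorem stageA2 (dm rm : List (List Int)) :
    (List.range dm.length).foldl
        (fun dp i => aSet2 dp (i+1) 0 ((dm.getD i []).getD 0 0 + aGet2 dp i 0))
        (rowsB dm rm 0 :: List.replicate dm.length (List.replicate ((rm.getD 0 []).length+1) 0))
      = rowsB dm rm 0 ::
          (List.range dm.length).map (fun i => colSeq dm (i+1) :: List.replicate (rm.getD 0 []).length 0) := by
  rw [loop2_spec dm rm dm.length le_rfl, Nat.sub_self, List.replicate_zero, List.append_nil]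

theorem stageA3 (dm rm : List (List Int)) :
    (List.range' 1 dm.length).foldl
        (fun dp i => (List.range' 1 (rm.getD 0 []).length).foldl
          (fun dp j =>
            let downVal := (dm.getD (i-1) []).getD j 0
            let rightVal := (rm.getD i []).getD (j-1) 0
            aSet2 dp i j (max (aGet2 dp (i-1) j + downVal) (aGet2 dp i (j-1) + rightVal))) dp)
        (rowsB dm rm 0 ::
          (List.range dm.length).map (fun i => colSeq dm (i+1) :: List.replicate (rm.getD 0 []).length 0))
      = (List.range dm.length).map (rowsB dm rm) ++ [rowsB dm rm dm.length] := by
  rw [loop3_spec dm rm dm.length le_rfl, Nat.sub_self, List.range'_zero, List.map_nil,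
    List.append_nil, List.range_succ, List.map_append, List.map_cons, List.map_nil]

-- ===== VERDICT (by name: the statement is the Claim_ definition above) =====
theorem findLongestGridPathLength_spec : Claim_equal_findLongestGridPathLength := by
  intro dm rm _ _
  show findLongestGridPathLength dm rm = findLongestGridPathLength_alt dm rm
  simp only [findLongestGridPathLength, findLongestGridPathLength_alt, PySem.List.pyGetD_zero]
  rw [stageA1, stageA2, stageA3, PySem.List.pyGetD_neg_one_append_singleton]
  have hlen : (rowsB dm rm dm.length).length = (rm.getD 0 []).length + 1 := by
    cases hn : dm.length with
    | zero => exact prefP_length _ _ le_rfl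
    | succ k => exact bsp_length ..
  have hlast : PySem.List.pyGetD (rowsB dm rm dm.length) (-1) 0
      = Fpure dm rm dm.length (rm.getD 0 []).length := by
    rw [← getD_last_eq_pyGetD _ (by intro hc; rw [hc] at hlen; simp at hlen), hlen]
    simpa using rowsB_getD_F dm rm dm.length (rm.getD 0 []).length le_rfl
  rw [hlast]
  have hB := fB_correct dm rm dm.length (rm.getD 0 []).length PySem.Dict.empty
    (by intro i j v hv; rw [PySem.Dict.get?_empty] at hv; cases hv)
  exact hB.1.symm
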